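-- pv_equiv track=rewrite | github.com/abimarticio/practice-problems | nlp/prob_02.py | get_char_largest_vocab
-- ===== SOURCE A (Python) =====
-- def get_char_largest_vocab(dict_lines: dict):
--     d = {}
--     new_d = {}
--     for key, value in dict_lines.items():
--         new_value = [word for line in value for word in line.split()]
--         d[key] = new_value
--
--     for k in sorted(d, key=lambda k:len(d[k]), reverse=True):
--         key = k
--         value = len(d[k])
--         new_d[key] = value
--     top_1_char_most_vocab = dict(sorted(new_d.items(), key=lambda item: item[1], reverse=True)[:1])
--     return top_1_char_most_vocab
-- ===== SOURCE B (Python) =====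
-- def get_char_largest_vocab(dict_lines: dict):
--     counts = {k: sum(len(line.split()) for line in v) for k, v in dict_lines.items()}
--     if not counts:
--         return {}
--     best = max(counts.items(), key=lambda kv: kv[1])
--     return {best[0]: best[1]}
-- ===== Notes on version B (the rewrite author's own statement) =====
-- stated objective: simpler
-- what changed: Replaces A's two stable sorts (keys by token count, then items by count, sliced to one) with a single comprehension of per-key token counts and one linear max-scan whose first-maximum tie-break matches A's stable-sort order.
import Mathlib
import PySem

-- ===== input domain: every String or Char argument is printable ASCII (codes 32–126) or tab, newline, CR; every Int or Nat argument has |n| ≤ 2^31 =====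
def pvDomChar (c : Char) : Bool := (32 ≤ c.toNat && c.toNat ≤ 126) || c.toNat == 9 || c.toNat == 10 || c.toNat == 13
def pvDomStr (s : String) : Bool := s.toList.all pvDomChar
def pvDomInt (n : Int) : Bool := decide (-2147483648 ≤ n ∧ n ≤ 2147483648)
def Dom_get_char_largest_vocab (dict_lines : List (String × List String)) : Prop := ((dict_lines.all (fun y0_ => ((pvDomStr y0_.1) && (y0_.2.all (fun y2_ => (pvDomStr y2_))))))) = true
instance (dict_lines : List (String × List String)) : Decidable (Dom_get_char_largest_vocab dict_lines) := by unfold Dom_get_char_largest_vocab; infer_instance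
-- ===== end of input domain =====

-- B replaces A's two stable sorts plus top-1 slice with one per-key token-count pass and a single
-- first-maximum scan (objective: simpler); first-max tie-break equals A's stable-sort order.


-- ===== PORT A =====
def get_char_largest_vocab (dict_lines : List (String × List String)) : List (String × Int) :=
  -- d[key] = [word for line in value for word in line.split()]
  let d : PySem.Dict String (List String) :=
    dict_lines.foldl
      (fun d kv => d.insert kv.1 (kv.2.flatMap (fun line => PySem.Str.split₀ line)))
      PySem.Dict.empty
  -- for k in sorted(d, key=lambda k: len(d[k]), reverse=True): new_d[k] = len(d[k])
  -- (d[k] ported as getD with default []: k is always a key of d here, so the default is never used)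
  let new_d : PySem.Dict String Int :=
    (PySem.List.sorted d.keys (fun k => ((d.getD k []).length : Int)) true).foldl
      (fun nd k => nd.insert k ((d.getD k []).length : Int)) PySem.Dict.empty
  -- dict(sorted(new_d.items(), key=lambda item: item[1], reverse=True)[:1])
  let top := PySem.List.slice
    (PySem.List.sorted new_d.items (fun item => item.2) true) none (some 1)
  (top.foldl (fun dd p => dd.insert p.1 p.2) PySem.Dict.empty).items

-- ===== PORT B =====
def get_char_largest_vocab_alt (dict_lines : List (String × List String)) : List (String × Int) :=
  -- counts = {k: sum(len(line.split()) for line in v) for k, v in dict_lines.items()}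
  let counts : PySem.Dict String Int :=
    dict_lines.foldl
      (fun d kv => d.insert kv.1
        (kv.2.foldl (fun acc line => acc + ((PySem.Str.split₀ line).length : Int)) 0))
      PySem.Dict.empty
  -- if not counts: return {}
  if counts.items.isEmpty then []
  else
    -- best = max(counts.items(), key=lambda kv: kv[1]); return {best[0]: best[1]}
    match PySem.List.max? counts.items (fun kv => kv.2) with
    | some best => [(best.1, best.2)]
    | none => []

-- ===== PRECONDITION & SPEC =====
def Spec_get_char_largest_vocab (dict_lines : List (String × List String)) (out : List (String × Int)) : Prop := out = get_char_largest_vocab_alt dict_lines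
instance (dict_lines : List (String × List String)) (out : List (String × Int)) : Decidable (Spec_get_char_largest_vocab dict_lines out) := by unfold Spec_get_char_largest_vocab; infer_instance

-- ===== CLAIM (what is proved, stated in full; the proofs are below) =====
def Claim_equal_get_char_largest_vocab : Prop := ∀ (dict_lines : List (String × List String)), Dom_get_char_largest_vocab dict_lines → Spec_get_char_largest_vocab dict_lines (get_char_largest_vocab dict_lines)

-- ===== LEMMAS AND PROOFS =====

-- B's running sum of per-line token counts is the length of A's flattened token list.
lemma pv_cnt_eq (v : List String) : ∀ a : Int,
    v.foldl (fun acc line => acc + ((PySem.Str.split₀ line).length : Int)) a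
      = a + ((v.flatMap (fun line => PySem.Str.split₀ line)).length : Int) := by
  induction v with
  | nil => intro a; simp
  | cons x t ih =>
    intro a
    simp only [List.foldl_cons, ih, List.flatMap_cons, List.length_append]
    push_cast; ring

lemma pv_insertBy_cons {α : Type} (bef : α → α → Bool) (x y : α) (t : List α) :
    PySem.List.insertBy bef x (y :: t)
      = if bef x y then x :: y :: t else y :: PySem.List.insertBy bef x t := by
  rfl

-- head of the insertion-sort fold = the first-max fold
lemma pv_head_foldl_insertBy {α κ : Type} [LinearOrder κ] (key : α → κ) :
    ∀ (xs acc : List α),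
      (xs.foldl (fun a x => PySem.List.insertBy (fun a b => decide (key b < key a)) x a) acc).head?
        = xs.foldl
            (fun m x => match m with
              | none => some x
              | some m => if key m < key x then some x else some m)
            acc.head? := by
  intro xs
  induction xs with
  | nil => intro acc; rfl
  | cons x t ih =>
    intro acc
    simp only [List.foldl_cons]
    rw [ih]
    congr 1
    cases acc with
    | nil => rfl
    | cons y ys =>
      rw [pv_insertBy_cons]
      by_cases h : key y < key x
      · simp [h]
      · simp [h]

lemma pv_head_sorted_rev_eq_max? {α κ : Type} [LinearOrder κ] (xs : List α) (key : α → κ) :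
    (PySem.List.sorted xs key true).head? = PySem.List.max? xs key := by
  rw [PySem.List.sorted_rev_eq_foldl_insertBy, pv_head_foldl_insertBy]
  rfl

-- inserting mapped values preserves the "items are mapped items" relation
lemma pv_insert_items_map {ν₁ ν₂ : Type} (h : ν₁ → ν₂) (d₁ : PySem.Dict String ν₁)
    (d₂ : PySem.Dict String ν₂) (k : String) (v : ν₁)
    (hItems : d₂.items = d₁.items.map (fun p => (p.1, h p.2))) :
    (d₂.insert k (h v)).items = (d₁.insert k v).items.map (fun p => (p.1, h p.2)) := by
  have hc : d₂.contains k = d₁.contains k := by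
    simp [PySem.Dict.contains, hItems, List.any_map, Function.comp_def]
  by_cases hck : d₁.contains k = true
  · simp only [PySem.Dict.insert, hc, hck, if_pos, hItems, List.map_map]
    refine List.map_congr_left ?_
    intro p _
    by_cases hp : p.1 = k <;> simp [hp]
  · simp only [PySem.Dict.insert, hc, hck, hItems]
    simp

lemma pv_foldl_insert_items_map {β ν₁ ν₂ : Type} (h : ν₁ → ν₂) (key : β → String) (g : β → ν₁) :
    ∀ (l : List β) (d₁ : PySem.Dict String ν₁) (d₂ : PySem.Dict String ν₂),
      d₂.items = d₁.items.map (fun p => (p.1, h p.2)) →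
      (l.foldl (fun d x => d.insert (key x) (h (g x))) d₂).items
        = (l.foldl (fun d x => d.insert (key x) (g x)) d₁).items.map (fun p => (p.1, h p.2)) := by
  intro l
  induction l with
  | nil => intro d₁ d₂ hI; simpa using hI
  | cons x t ih =>
    intro d₁ d₂ hI
    simp only [List.foldl_cons]
    exact ih _ _ (pv_insert_items_map h d₁ d₂ (key x) (g x) hI)

-- folding fresh inserts over nodup keys just appends the pairs
lemma pv_items_foldl_insert_fresh (g : String → Int) :
    ∀ (ks : List String) (d : PySem.Dict String Int), ks.Nodup →
      (∀ k ∈ ks, d.contains k = false) →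
      (ks.foldl (fun nd k => nd.insert k (g k)) d).items = d.items ++ ks.map (fun k => (k, g k)) := by
  intro ks
  induction ks with
  | nil => intro d _ _; simp
  | cons k t ih =>
    intro d hnd hfresh
    have hk : d.contains k = false := hfresh k (by simp)
    have hins : (d.insert k (g k)).items = d.items ++ [(k, g k)] := by
      simp [PySem.Dict.insert, hk]
    have hfresh' : ∀ k' ∈ t, (d.insert k (g k)).contains k' = false := by
      intro k' hk'
      have hne : k' ≠ k := by
        intro hEq; exact (List.nodup_cons.mp hnd).1 (hEq ▸ hk')
      have h1 : d.items.any (fun p => p.1 == k') = false := hfresh k' (List.mem_cons_of_mem _ hk')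
      show (d.insert k (g k)).items.any (fun p => p.1 == k') = false
      rw [hins, List.any_append, h1]
      simp only [Bool.false_or, List.any_cons, List.any_nil, Bool.or_false, beq_eq_false_iff_ne]
      exact Ne.symm hne
    simp only [List.foldl_cons]
    rw [ih _ (List.nodup_cons.mp hnd).2 hfresh', hins]
    simp

-- max? commutes with mapping the elements
lemma pv_max?_foldl_map {α β κ : Type} [LinearOrder κ] (f : α → β) (key : β → κ) :
    ∀ (xs : List α) (m : Option α),
      ((xs.map f).foldl
          (fun acc x => match acc with
            | none => some x
            | some m => if key m < key x then some x else some m) (m.map f))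
        = (xs.foldl
            (fun acc x => match acc with
              | none => some x
              | some m => if key (f m) < key (f x) then some x else some m) m).map f := by
  intro xs
  induction xs with
  | nil => intro m; rfl
  | cons x t ih =>
    intro m
    simp only [List.map_cons, List.foldl_cons]
    rw [← ih]
    congr 1
    cases m with
    | none => rfl
    | some a => by_cases h : key (f a) < key (f x) <;> simp [h]

lemma pv_max?_map {α β κ : Type} [LinearOrder κ] (f : α → β) (key : β → κ) (xs : List α) :
    PySem.List.max? (xs.map f) key = (PySem.List.max? xs (fun x => key (f x))).map f := by
  simpa [PySem.List.max?] using pv_max?_foldl_map f key xs none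

-- ===== VERDICT (by name: the statement is the Claim_ definition above) =====
theorem get_char_largest_vocab_spec : Claim_equal_get_char_largest_vocab := by
  intro dict_lines _
  show get_char_largest_vocab dict_lines = get_char_largest_vocab_alt dict_lines
  simp only [get_char_largest_vocab, get_char_largest_vocab_alt]
  set d : PySem.Dict String (List String) :=
    dict_lines.foldl
      (fun d kv => d.insert kv.1 (kv.2.flatMap (fun line => PySem.Str.split₀ line)))
      PySem.Dict.empty with hd
  have hdnod : d.keys.Nodup := by
    rw [hd]
    exact PySem.Dict.nodup_keys_foldl_insert_key dict_lines (fun kv => kv.1)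
      (fun _ kv => kv.2.flatMap (fun line => PySem.Str.split₀ line)) _
      PySem.Dict.nodup_keys_empty
  -- B's counts dict, rewritten through pv_cnt_eq
  have hBfun : (fun (dd : PySem.Dict String Int) (kv : String × List String) =>
        dd.insert kv.1 (kv.2.foldl (fun acc line => acc + ((PySem.Str.split₀ line).length : Int)) 0))
      = (fun dd kv => dd.insert kv.1
          (((kv.2.flatMap (fun line => PySem.Str.split₀ line)).length : Int))) := by
    funext dd kv
    rw [pv_cnt_eq]
    simp
  have hcounts :
      (dict_lines.foldl
        (fun dd kv => dd.insert kv.1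
          (kv.2.foldl (fun acc line => acc + ((PySem.Str.split₀ line).length : Int)) 0))
        PySem.Dict.empty).items
      = d.items.map (fun p => (p.1, (p.2.length : Int))) := by
    rw [hBfun, hd]
    exact pv_foldl_insert_items_map (fun v => (v.length : Int)) (fun kv => kv.1)
      (fun kv => kv.2.flatMap (fun line => PySem.Str.split₀ line)) dict_lines
      PySem.Dict.empty PySem.Dict.empty (by simp [PySem.Dict.empty])
  have hitems : d.items = d.keys.map (fun k => (k, d.getD k [])) :=
    PySem.Dict.items_eq_map_keys d hdnod []
  have hcounts2 :
      (dict_lines.foldl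
        (fun dd kv => dd.insert kv.1
          (kv.2.foldl (fun acc line => acc + ((PySem.Str.split₀ line).length : Int)) 0))
        PySem.Dict.empty).items
      = d.keys.map (fun k => (k, ((d.getD k []).length : Int))) := by
    rw [hcounts, hitems, List.map_map]
    rfl
  -- A's sorted key list
  set sk : List String :=
    PySem.List.sorted d.keys (fun k => ((d.getD k []).length : Int)) true with hsk
  have hsknod : sk.Nodup :=
    (PySem.List.sorted_perm d.keys (fun k => ((d.getD k []).length : Int)) true).nodup_iff.mpr hdnod
  have hnewd :
      (sk.foldl (fun nd k => nd.insert k ((d.getD k []).length : Int)) PySem.Dict.empty).items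
        = sk.map (fun k => (k, ((d.getD k []).length : Int))) := by
    rw [pv_items_foldl_insert_fresh _ sk PySem.Dict.empty hsknod
      (fun k _ => by simp [PySem.Dict.contains, PySem.Dict.empty])]
    simp [PySem.Dict.empty]
  have hpair :
      (sk.map (fun k => (k, ((d.getD k []).length : Int)))).Pairwise
        (fun a b => (fun item : String × Int => item.2) b ≤ (fun item : String × Int => item.2) a) := by
    refine List.pairwise_map.mpr ?_
    simpa using PySem.List.sorted_pairwise_rev d.keys (fun k => ((d.getD k []).length : Int))
  have hsorted2 :
      PySem.List.sorted
        (sk.foldl (fun nd k => nd.insert k ((d.getD k []).length : Int)) PySem.Dict.empty).items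
        (fun item => item.2) true
      = sk.map (fun k => (k, ((d.getD k []).length : Int))) := by
    rw [hnewd]
    exact PySem.List.sorted_rev_eq_self_of_pairwise _ _ hpair
  have hhead : sk.head? = PySem.List.max? d.keys (fun k => ((d.getD k []).length : Int)) := by
    rw [hsk]; exact pv_head_sorted_rev_eq_max? _ _
  cases hmax : PySem.List.max? d.keys (fun k => ((d.getD k []).length : Int)) with
  | none =>
    have hk0 : d.keys = [] := (PySem.List.max?_eq_none_iff _ _).mp hmax
    have hsk0 : sk = [] := by
      rw [hsk]; exact (PySem.List.sorted_eq_nil_iff _ _ _).mpr hk0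
    rw [hsk0, hcounts2, hk0]
    simp [PySem.List.sorted, PySem.List.slice, PySem.Dict.empty]
  | some m =>
    have hne : sk ≠ [] := by
      intro h0
      rw [h0, hmax] at hhead
      simp at hhead
    obtain ⟨m', t, hskc⟩ := List.exists_cons_of_ne_nil hne
    have hm' : m = m' := by
      have h2 := hhead
      rw [hskc, hmax] at h2
      exact (Option.some.inj h2).symm
    subst hm'
    have hkne : d.keys ≠ [] := by
      intro h0
      have h1 := (PySem.List.max?_eq_none_iff d.keys
        (fun k => ((d.getD k []).length : Int))).mpr h0
      rw [hmax] at h1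
      simp at h1
    have hcne : d.keys.map (fun k => (k, ((d.getD k []).length : Int))) ≠ [] := by
      simpa using hkne
    rw [hcounts2, hsorted2, hskc, List.map_cons]
    have hmaxc :
        PySem.List.max? (d.keys.map (fun k => (k, ((d.getD k []).length : Int))))
          (fun kv => kv.2) = some (m, ((d.getD m []).length : Int)) := by
      rw [pv_max?_map (fun k => (k, ((d.getD k []).length : Int))) (fun kv : String × Int => kv.2) d.keys]
      show (PySem.List.max? d.keys fun k => ((d.getD k []).length : Int)).map
        (fun k => (k, ((d.getD k []).length : Int))) = _
      rw [hmax]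
      rfl
    have htake : PySem.List.slice
        ((m, ((d.getD m []).length : Int)) :: t.map (fun k => (k, ((d.getD k []).length : Int))))
        none (some 1)
        = [(m, ((d.getD m []).length : Int))] := by
      rw [PySem.List.slice_to _ (by norm_num : (0:Int) ≤ 1)]
      simp
    have hE : (d.keys.map (fun k => (k, ((d.getD k []).length : Int)))).isEmpty = false := by
      cases hdk : d.keys with
      | nil => exact absurd hdk hkne
      | cons a l => simp
    rw [htake, hmaxc, hE]
    simp [PySem.Dict.insert, PySem.Dict.contains, PySem.Dict.empty]
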